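-- pv_equiv track=rewrite | github.com/Arzamasov-Zakhar/interesting_scripts | TrueRomanNum.py | true_roman_num
-- ===== SOURCE A (Python) =====
-- def true_roman_num(romannum: str) -> bool:
--     check_list = ["IIII", "VVVV", "XXXX", "LLLL", "CCCC", "DDDD", "MMMM"]
--     for isinst in check_list:
--         if isinst in romannum:
--             return False
--     for index, let in enumerate(romannum):
--         if let == "I":
--             for i in ["IV", "VV", "X", "L", "C", "D", "M"]:
--                 if i in romannum[index + 1:]:
--                     return False
--         elif let == "V":
--             for i in ["VX", "XX", "L", "C", "D", "M"]:
--                 if i in romannum[index + 1:]: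
--                     return False
--         elif let == "X":
--             for i in ["XL", "LL", "C", "D", "M"]:
--                 if i in romannum[index + 1:]:
--                     return False
--         elif let == "L":
--             for i in ["LC", "CC", "D", "M"]:
--                 if i in romannum[index + 1:]:
--                     return False
--         elif let == "C":
--             for i in ["CD", "DD", "M"]:
--                 if i in romannum[index + 1:]:
--                     return False
--         elif let == "D":
--             for i in ["DM", "MM"]:
--                 if i in romannum[index + 1:]:
--                     return False
--     return True
-- ===== SOURCE B (Python) =====
-- _RULES = (
--     ("I", ("IV", "VV", "X", "L", "C", "D", "M")),
--     ("V", ("VX", "XX", "L", "C", "D", "M")),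
--     ("X", ("XL", "LL", "C", "D", "M")),
--     ("L", ("LC", "CC", "D", "M")),
--     ("C", ("CD", "DD", "M")),
--     ("D", ("DM", "MM")),
-- )
--
--
-- def true_roman_num(romannum: str) -> bool:
--     # quadruple repetition of a Roman digit
--     if any(c * 4 in romannum for c in "IVXLCDM"):
--         return False
--     # an ordering rule is violated after SOME occurrence of a letter iff it is
--     # violated after the FIRST occurrence, so one find per letter suffices
--     for c, pats in _RULES:
--         fi = romannum.find(c)
--         if fi >= 0:
--             tail = romannum[fi + 1:]
--             if any(p in tail for p in pats):
--                 return False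
--     return True
-- ===== Notes on version B (the rewrite author's own statement) =====
-- stated objective: faster
-- what changed: Instead of scanning every index of the string and substring-searching its suffix (A's quadratic nested loops), B computes the first occurrence of each of the six Roman letters once with str.find and checks each forbidden pattern only in the suffix after that first occurrence, which is equivalent because a later occurrence has a smaller suffix.
import Mathlib
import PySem

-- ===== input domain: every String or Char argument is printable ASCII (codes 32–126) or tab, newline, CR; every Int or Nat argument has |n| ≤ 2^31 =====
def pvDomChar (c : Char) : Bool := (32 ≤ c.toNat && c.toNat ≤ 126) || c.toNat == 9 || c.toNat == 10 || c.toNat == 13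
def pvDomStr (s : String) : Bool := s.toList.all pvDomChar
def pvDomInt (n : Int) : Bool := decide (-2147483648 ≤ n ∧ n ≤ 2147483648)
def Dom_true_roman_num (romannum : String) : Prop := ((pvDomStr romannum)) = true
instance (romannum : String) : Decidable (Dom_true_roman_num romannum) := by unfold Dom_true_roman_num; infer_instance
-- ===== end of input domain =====

-- B checks each ordering rule only after the FIRST occurrence of its letter (one str.find per
-- letter, O(n) total) instead of A's scan of every index with a substring search per suffix (O(n^2)).

-- ===== PORT A =====
-- pattern lists of A's elif chain (shared data tables, used by both ports)
def psI : List (List Char) := [['I','V'], ['V','V'], ['X'], ['L'], ['C'], ['D'], ['M']]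
def psV : List (List Char) := [['V','X'], ['X','X'], ['L'], ['C'], ['D'], ['M']]
def psX : List (List Char) := [['X','L'], ['L','L'], ['C'], ['D'], ['M']]
def psL : List (List Char) := [['L','C'], ['C','C'], ['D'], ['M']]
def psC : List (List Char) := [['C','D'], ['D','D'], ['M']]
def psD : List (List Char) := [['D','M'], ['M','M']]

-- A's if/elif chain: which patterns are forbidden after a given letter
def patsA (ch : Char) : List (List Char) :=
  if ch = 'I' then psI
  else if ch = 'V' then psV
  else if ch = 'X' then psX
  else if ch = 'L' then psL
  else if ch = 'C' then psC
  else if ch = 'D' then psD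
  else []

def checkListA : List (List Char) :=
  [['I','I','I','I'], ['V','V','V','V'], ['X','X','X','X'], ['L','L','L','L'],
   ['C','C','C','C'], ['D','D','D','D'], ['M','M','M','M']]

def true_roman_num (romannum : String) : Bool :=
  let l := romannum.toList
  if checkListA.any (fun p => PySem.Chars.isIn p l) then false
  else if (PySem.List.enumerate l 0).any (fun ic =>
      (patsA ic.2).any (fun p => PySem.Chars.isIn p (PySem.Chars.slice l (some (ic.1 + 1)) none)))
    then false
  else true

-- ===== PORT B =====
def rulesB : List (Char × List (List Char)) :=
  [('I', psI), ('V', psV), ('X', psX), ('L', psL), ('C', psC), ('D', psD)]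

def true_roman_num_alt (romannum : String) : Bool :=
  let l := romannum.toList
  if (['I','V','X','L','C','D','M'].any (fun c => PySem.Chars.isIn (List.replicate 4 c) l)) then false
  else if rulesB.any (fun cp =>
      let fi := PySem.Chars.find l [cp.1]
      decide (0 ≤ fi) && cp.2.any (fun p =>
        PySem.Chars.isIn p (PySem.Chars.slice l (some (fi + 1)) none)))
    then false
  else true

-- ===== PRECONDITION & SPEC =====
def Spec_true_roman_num (romannum : String) (out : Bool) : Prop := out = true_roman_num_alt romannum
instance (romannum : String) (out : Bool) : Decidable (Spec_true_roman_num romannum out) := by unfold Spec_true_roman_num; infer_instance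

-- ===== CLAIM (what is proved, stated in full; the proofs are below) =====
def Claim_equal_true_roman_num : Prop := ∀ (romannum : String), Dom_true_roman_num romannum → Spec_true_roman_num romannum (true_roman_num romannum)

-- ===== LEMMAS AND PROOFS =====

-- a one-element pattern is a prefix of `l.drop k` iff l[k] is that element
lemma single_prefix_drop (l : List Char) (c : Char) (k : Nat) :
    [c] <+: l.drop k ↔ l[k]? = some c := by
  constructor
  · rintro ⟨t, ht⟩
    have hk : k < l.length := by
      by_contra h
      have : l.drop k = [] := List.drop_eq_nil_of_le (by omega)
      simp [this] at ht
    have hcd := List.getElem_cons_drop (as := l) (i := k) hk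
    rw [List.getElem?_eq_getElem hk]
    have h2 := hcd.trans ht.symm
    injection h2 with h3 _
    simp [h3]
  · intro h
    have hk : k < l.length := by
      by_contra hk
      rw [List.getElem?_eq_none (by omega)] at h; simp at h
    rw [List.getElem?_eq_getElem hk] at h
    refine ⟨l.drop (k + 1), ?_⟩
    rw [← List.getElem_cons_drop (as := l) (i := k) hk]
    simp_all

-- violation after SOME occurrence of c  ↔  violation after the FIRST occurrence of c
lemma viol_iff (l : List Char) (c : Char) (ps : List (List Char)) :
    (∃ k, ∃ _ : k < l.length, l[k] = c ∧
        ∃ p ∈ ps, PySem.Chars.isIn p (l.drop (k + 1)) = true)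
    ↔ (0 ≤ PySem.Chars.find l [c] ∧
        ∃ p ∈ ps, PySem.Chars.isIn p (l.drop ((PySem.Chars.find l [c]).toNat + 1)) = true) := by
  constructor
  · rintro ⟨k, hk, hc, p, hp, hin⟩
    have hmem : c ∈ l := hc ▸ l.getElem_mem hk
    obtain ⟨s1, s2, hl⟩ := List.append_of_mem hmem
    have hinf : [c] <:+: l := ⟨s1, s2, by simp [hl]⟩
    have h0 : 0 ≤ PySem.Chars.find l [c] := (PySem.Chars.find_nonneg_iff l [c]).mpr hinf
    obtain ⟨hpref, hmin⟩ := PySem.Chars.find_spec h0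
    have hkpref : [c] <+: l.drop k :=
      (single_prefix_drop l c k).mpr (by rw [List.getElem?_eq_getElem hk, hc])
    have hle : (PySem.Chars.find l [c]).toNat ≤ k := by
      by_contra h
      exact hmin k (by omega) hkpref
    refine ⟨h0, p, hp, ?_⟩
    have hinf2 := (PySem.Chars.isIn_iff_infix p _).mp hin
    have hsuf : l.drop (k + 1) <:+ l.drop ((PySem.Chars.find l [c]).toNat + 1) := by
      have hdd : (l.drop ((PySem.Chars.find l [c]).toNat + 1)).drop
          (k - (PySem.Chars.find l [c]).toNat) = l.drop (k + 1) := by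
        rw [List.drop_drop]; congr 1; omega
      exact hdd ▸ List.drop_suffix _ _
    exact (PySem.Chars.isIn_iff_infix p _).mpr (hinf2.trans hsuf.isInfix)
  · rintro ⟨h0, p, hp, hin⟩
    obtain ⟨hpref, -⟩ := PySem.Chars.find_spec h0
    have hg := (single_prefix_drop l c _).mp hpref
    have hk : (PySem.Chars.find l [c]).toNat < l.length := by
      by_contra h
      rw [List.getElem?_eq_none (by omega)] at hg; simp at hg
    rw [List.getElem?_eq_getElem hk] at hg
    exact ⟨(PySem.Chars.find l [c]).toNat, hk, by simpa using hg, p, hp, hin⟩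

def ViolP (l : List Char) (c : Char) (ps : List (List Char)) : Prop :=
  ∃ k, ∃ _ : k < l.length, l[k] = c ∧ ∃ p ∈ ps, PySem.Chars.isIn p (l.drop (k + 1)) = true

lemma slice_drop (l : List Char) (k : Nat) :
    PySem.Chars.slice l (some ((0 : Int) + k + 1)) none = l.drop (k + 1) := by
  have h : (0 : Int) + k + 1 = ((k + 1 : Nat) : Int) := by push_cast; ring
  rw [h, PySem.Chars.slice_eq_listSlice, PySem.List.slice_from_natCast]

lemma slice_drop_int (l : List Char) (f : Int) (h0 : 0 ≤ f) :
    PySem.Chars.slice l (some (f + 1)) none = l.drop (f.toNat + 1) := by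
  have h : f + 1 = ((f.toNat + 1 : Nat) : Int) := by omega
  rw [h, PySem.Chars.slice_eq_listSlice, PySem.List.slice_from_natCast]

-- A's enumerate scan, expressed as the six per-letter violation predicates
lemma lhs_iff (l : List Char) :
    ((PySem.List.enumerate l 0).any (fun ic =>
        (patsA ic.2).any (fun p =>
          PySem.Chars.isIn p (PySem.Chars.slice l (some (ic.1 + 1)) none))) = true)
    ↔ (ViolP l 'I' psI ∨ ViolP l 'V' psV ∨ ViolP l 'X' psX ∨
       ViolP l 'L' psL ∨ ViolP l 'C' psC ∨ ViolP l 'D' psD) := by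
  rw [List.any_eq_true]
  constructor
  · rintro ⟨ic, hmem, hany⟩
    obtain ⟨k, hk, rfl⟩ := (PySem.List.mem_enumerate_iff l 0 ic).mp hmem
    rw [List.any_eq_true] at hany
    obtain ⟨p, hp, hin⟩ := hany
    simp only at hp hin
    rw [slice_drop l k] at hin
    by_cases hI : l[k] = 'I'
    · exact Or.inl ⟨k, hk, hI, p, by rwa [hI] at hp, hin⟩
    by_cases hV : l[k] = 'V'
    · exact Or.inr (Or.inl ⟨k, hk, hV, p, by rwa [hV] at hp, hin⟩)
    by_cases hX : l[k] = 'X'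
    · exact Or.inr (Or.inr (Or.inl ⟨k, hk, hX, p, by rwa [hX] at hp, hin⟩))
    by_cases hL : l[k] = 'L'
    · exact Or.inr (Or.inr (Or.inr (Or.inl ⟨k, hk, hL, p, by rwa [hL] at hp, hin⟩)))
    by_cases hC : l[k] = 'C'
    · exact Or.inr (Or.inr (Or.inr (Or.inr (Or.inl ⟨k, hk, hC, p, by rwa [hC] at hp, hin⟩))))
    by_cases hD : l[k] = 'D'
    · exact Or.inr (Or.inr (Or.inr (Or.inr (Or.inr ⟨k, hk, hD, p, by rwa [hD] at hp, hin⟩))))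
    · exfalso
      simp [patsA, hI, hV, hX, hL, hC, hD] at hp
  · intro h
    have hmk : ∀ (k : Nat) (hk : k < l.length) (p : List Char), p ∈ patsA l[k] →
        PySem.Chars.isIn p (l.drop (k + 1)) = true →
        ∃ ic ∈ PySem.List.enumerate l 0, ((patsA ic.2).any (fun p =>
          PySem.Chars.isIn p (PySem.Chars.slice l (some (ic.1 + 1)) none))) = true := by
      intro k hk p hp hin
      refine ⟨((0 : Int) + k, l[k]), (PySem.List.mem_enumerate_iff l 0 _).mpr ⟨k, hk, rfl⟩, ?_⟩
      rw [List.any_eq_true]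
      exact ⟨p, hp, by rw [slice_drop l k]; exact hin⟩
    rcases h with ⟨k,hk,hc,p,hp,hin⟩|⟨k,hk,hc,p,hp,hin⟩|⟨k,hk,hc,p,hp,hin⟩|⟨k,hk,hc,p,hp,hin⟩|⟨k,hk,hc,p,hp,hin⟩|⟨k,hk,hc,p,hp,hin⟩ <;>
      exact hmk k hk p (by rw [hc]; exact hp) hin

-- one rule of B's table
lemma rhs_term_iff (l : List Char) (c : Char) (ps : List (List Char)) :
    ((decide (0 ≤ PySem.Chars.find l [c]) && ps.any (fun p =>
        PySem.Chars.isIn p (PySem.Chars.slice l (some (PySem.Chars.find l [c] + 1)) none))) = true)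
    ↔ ViolP l c ps := by
  rw [Bool.and_eq_true, decide_eq_true_iff, List.any_eq_true]
  constructor
  · rintro ⟨h0, p, hp, hin⟩
    exact (viol_iff l c ps).mpr ⟨h0, p, hp, by rwa [slice_drop_int l _ h0] at hin⟩
  · intro hv
    obtain ⟨h0, p, hp, hin⟩ := (viol_iff l c ps).mp hv
    exact ⟨h0, p, hp, by rwa [slice_drop_int l _ h0]⟩

lemma phase2_eq (l : List Char) :
    ((PySem.List.enumerate l 0).any (fun ic =>
        (patsA ic.2).any (fun p =>
          PySem.Chars.isIn p (PySem.Chars.slice l (some (ic.1 + 1)) none))))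
    = (rulesB.any (fun cp =>
        decide (0 ≤ PySem.Chars.find l [cp.1]) && cp.2.any (fun p =>
          PySem.Chars.isIn p (PySem.Chars.slice l (some (PySem.Chars.find l [cp.1] + 1)) none)))) := by
  rw [Bool.eq_iff_iff, lhs_iff]
  simp only [rulesB, List.any_cons, List.any_nil, Bool.or_eq_true]
  rw [rhs_term_iff l 'I' psI, rhs_term_iff l 'V' psV, rhs_term_iff l 'X' psX,
      rhs_term_iff l 'L' psL, rhs_term_iff l 'C' psC, rhs_term_iff l 'D' psD]
  tauto

-- ===== VERDICT (by name: the statement is the Claim_ definition above) =====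
theorem true_roman_num_spec : Claim_equal_true_roman_num := by
  intro r _
  show true_roman_num r = true_roman_num_alt r
  simp only [true_roman_num, true_roman_num_alt]
  have h1 : checkListA.any (fun p => PySem.Chars.isIn p r.toList)
      = (['I','V','X','L','C','D','M'].any (fun c =>
          PySem.Chars.isIn (List.replicate 4 c) r.toList)) := rfl
  rw [h1, phase2_eq r.toList]
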